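-- pv_equiv track=rewrite | github.com/Free-Flying-Elephant/DopeSnake | func.py | turn_2_avoid_tail
-- ===== SOURCE A (Python) =====
-- def turn_2_avoid_tail(head_pos, decision, tail_pos) -> str:
--     diff = []
--     if "left" in decision:
--         for tail in tail_pos[1:]:
--             if tail[1] == head_pos[1]:
--                 diff.append(head_pos[0] - tail[0])
--         if len(diff) == 0: diff.append(0)
--         try:
--             idx = diff.index(min([abs(x) for x in diff]))
--             idx = 1 # go right
--             turn = "right"
--         except ValueError:
--             idx = diff.index(-min([abs(x) for x in diff]))
--             idx = -1 # go left
--             turn = "left"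
--     else:
--         for tail in tail_pos[1:]:
--             if tail[0] == head_pos[0]:
--                 diff.append(head_pos[1] - tail[1])
--         if len(diff) == 0: diff.append(0)
--         try:
--             idx = diff.index(min([abs(x) for x in diff]))
--             idx = 1 # go down
--             turn = "down"
--         except ValueError:
--             idx = diff.index(-min([abs(x) for x in diff]))
--             idx = -1 # go up
--             turn = "up"
--     return turn
-- ===== SOURCE B (Python) =====
-- def _better(best, d):
--     if best is None or abs(d) < abs(best) or (abs(d) == abs(best) and d > best):
--         return d
--     return best
--
-- def turn_2_avoid_tail(head_pos, decision, tail_pos) -> str: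
--     # single streaming pass: keep the aligned diff with smallest abs, preferring the
--     # larger (nonnegative) value on an abs-tie; no intermediate list, no min/membership passes
--     best = None
--     if "left" in decision:
--         for tail in tail_pos[1:]:
--             if tail[1] == head_pos[1]:
--                 best = _better(best, head_pos[0] - tail[0])
--         return "right" if best is None or best >= 0 else "left"
--     else:
--         for tail in tail_pos[1:]:
--             if tail[0] == head_pos[0]:
--                 best = _better(best, head_pos[1] - tail[1])
--         return "down" if best is None or best >= 0 else "up"
-- ===== Notes on version B (the rewrite author's own statement) =====
-- stated objective: alternative
-- what changed: A builds the filtered diff list, takes a min-of-abs pass and a membership pass (via try/except on .index); B is a single streaming pass keeping only one accumulator (the aligned diff of smallest absolute value, preferring the larger value on an abs-tie) and decides from its sign, building no list at all.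
import Mathlib
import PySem

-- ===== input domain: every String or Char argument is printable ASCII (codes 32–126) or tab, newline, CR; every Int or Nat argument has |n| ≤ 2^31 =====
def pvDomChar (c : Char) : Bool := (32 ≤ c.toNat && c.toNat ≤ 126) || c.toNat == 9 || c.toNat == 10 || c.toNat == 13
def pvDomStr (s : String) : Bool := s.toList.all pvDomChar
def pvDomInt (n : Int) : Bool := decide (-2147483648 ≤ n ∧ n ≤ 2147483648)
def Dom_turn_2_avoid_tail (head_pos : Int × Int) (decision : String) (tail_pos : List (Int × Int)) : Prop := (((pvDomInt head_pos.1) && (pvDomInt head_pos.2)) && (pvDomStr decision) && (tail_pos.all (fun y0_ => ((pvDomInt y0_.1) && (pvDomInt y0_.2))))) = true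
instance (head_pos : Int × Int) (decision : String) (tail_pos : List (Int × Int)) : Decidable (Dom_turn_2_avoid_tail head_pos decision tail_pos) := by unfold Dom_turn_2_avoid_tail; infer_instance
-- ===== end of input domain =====

-- B replaces A's three-stage computation (build the filtered diff list, min-of-abs pass,
-- membership test via try/except on .index) by ONE streaming pass with a single accumulator
-- (the aligned diff of smallest abs, preferring the larger value on an abs-tie), deciding
-- from its sign (objective: alternative, same O(n) cost, no intermediate list).

-- ===== PORT A =====
-- Literal transliteration of A. The inner `.index` calls: some = the index exists, none = ValueError.
-- The second `.index(-m)` can never raise (m = min |x| over a nonempty list is attained at m or -m),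
-- so the inner `none` arm and the `.getD 0` on the min of the nonempty list are unreachable.
def turn_2_avoid_tail (head_pos : Int × Int) (decision : String) (tail_pos : List (Int × Int)) : String :=
  let diff : List Int := []
  if PySem.Str.isIn "left" decision then
    let diff := (PySem.List.slice tail_pos (some 1) none).foldl
      (fun acc tail => if tail.2 == head_pos.2 then acc ++ [head_pos.1 - tail.1] else acc) diff
    let diff := if diff.length == 0 then diff ++ [(0 : Int)] else diff
    let m : Int := (PySem.List.min? (diff.map (fun x => |x|)) (fun y => y)).getD 0
    match PySem.List.index? diff m with
    | some _ => "right"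
    | none =>
      match PySem.List.index? diff (-m) with
      | some _ => "left"
      | none => "left"   -- unreachable (see comment above)
  else
    let diff := (PySem.List.slice tail_pos (some 1) none).foldl
      (fun acc tail => if tail.1 == head_pos.1 then acc ++ [head_pos.2 - tail.2] else acc) diff
    let diff := if diff.length == 0 then diff ++ [(0 : Int)] else diff
    let m : Int := (PySem.List.min? (diff.map (fun x => |x|)) (fun y => y)).getD 0
    match PySem.List.index? diff m with
    | some _ => "down"
    | none =>
      match PySem.List.index? diff (-m) with
      | some _ => "up"
      | none => "up"   -- unreachable (see comment above)

-- ===== PORT B =====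
-- Source B's `_better`: keep the diff of smaller abs; on an abs-tie keep the larger value.
def pvBetter (best : Option Int) (d : Int) : Option Int :=
  match best with
  | none => some d
  | some b => if |d| < |b| ∨ (|d| = |b| ∧ b < d) then some d else some b

def turn_2_avoid_tail_alt (head_pos : Int × Int) (decision : String) (tail_pos : List (Int × Int)) : String :=
  let best : Option Int := none
  if PySem.Str.isIn "left" decision then
    let best := (PySem.List.slice tail_pos (some 1) none).foldl
      (fun acc tail => if tail.2 == head_pos.2 then pvBetter acc (head_pos.1 - tail.1) else acc) best
    match best with
    | none => "right"
    | some b => if 0 ≤ b then "right" else "left"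
  else
    let best := (PySem.List.slice tail_pos (some 1) none).foldl
      (fun acc tail => if tail.1 == head_pos.1 then pvBetter acc (head_pos.2 - tail.2) else acc) best
    match best with
    | none => "down"
    | some b => if 0 ≤ b then "down" else "up"

-- ===== PRECONDITION & SPEC =====
def Spec_turn_2_avoid_tail (head_pos : Int × Int) (decision : String) (tail_pos : List (Int × Int)) (out : String) : Prop := out = turn_2_avoid_tail_alt head_pos decision tail_pos
instance (head_pos : Int × Int) (decision : String) (tail_pos : List (Int × Int)) (out : String) : Decidable (Spec_turn_2_avoid_tail head_pos decision tail_pos out) := by unfold Spec_turn_2_avoid_tail; infer_instance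

-- ===== CLAIM =====
def Claim_equal_turn_2_avoid_tail : Prop := ∀ (head_pos : Int × Int) (decision : String) (tail_pos : List (Int × Int)), Dom_turn_2_avoid_tail head_pos decision tail_pos → Spec_turn_2_avoid_tail head_pos decision tail_pos (turn_2_avoid_tail head_pos decision tail_pos)

-- ===== LEMMAS AND PROOFS =====

-- a conditional-update fold is the plain fold over the filtered-and-mapped list
theorem foldl_if_filter_map {α : Type} (g : Option Int → Int → Option Int)
    (p : α → Bool) (f : α → Int) (l : List α) (init : Option Int) :
    l.foldl (fun acc t => if p t then g acc (f t) else acc) init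
      = ((l.filter p).map f).foldl g init := by
  induction l generalizing init with
  | nil => rfl
  | cons x t ih =>
    by_cases h : p x = true <;> simp [List.foldl, List.filter, h, ih]

-- invariant of Source B's accumulator: the fold keeps an element of minimal abs,
-- and the largest value among those of minimal abs
theorem foldl_better_some (ds : List Int) (b : Int) :
    ∃ c, List.foldl pvBetter (some b) ds = some c ∧ c ∈ b :: ds ∧
      (∀ x ∈ b :: ds, |c| ≤ |x|) ∧ (∀ x ∈ b :: ds, |x| = |c| → x ≤ c) := by
  induction ds generalizing b with
  | nil => exact ⟨b, rfl, by simp, by simp, by simp⟩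
  | cons d t ih =>
    have hstep : List.foldl pvBetter (some b) (d :: t)
        = List.foldl pvBetter (pvBetter (some b) d) t := rfl
    by_cases hc : |d| < |b| ∨ (|d| = |b| ∧ b < d)
    · obtain ⟨c, hfold, hmem, hmin, hmax⟩ := ih d
      refine ⟨c, ?_, List.mem_cons_of_mem b hmem, ?_, ?_⟩
      · rw [hstep]; simpa [pvBetter, hc] using hfold
      · intro x hx
        rcases List.mem_cons.1 hx with rfl | hx
        · have hdc := hmin d (by simp)
          rcases hc with h | ⟨h, _⟩
          · exact le_of_lt (lt_of_le_of_lt hdc h)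
          · omega
        · exact hmin x hx
      · intro x hx hxe
        rcases List.mem_cons.1 hx with rfl | hx
        · have hdc := hmin d (by simp)
          rcases hc with h | ⟨h, hlt⟩
          · omega
          · have := hmax d (by simp)
            omega
        · exact hmax x hx hxe
    · obtain ⟨c, hfold, hmem, hmin, hmax⟩ := ih b
      have hmem' : c ∈ b :: d :: t := by
        rcases List.mem_cons.1 hmem with rfl | h
        · exact List.mem_cons_self
        · exact List.mem_cons_of_mem _ (List.mem_cons_of_mem _ h)
      refine ⟨c, ?_, hmem', ?_, ?_⟩
      · rw [hstep]; simpa [pvBetter, hc] using hfold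
      · intro x hx
        simp only [not_or, not_lt, not_and, not_lt] at hc
        rcases List.mem_cons.1 hx with rfl | hx
        · have hbc := hmin x (by simp)
          exact hbc
        · rcases List.mem_cons.1 hx with rfl | hx
          · have hbc := hmin b (by simp)
            omega
          · exact hmin x (List.mem_cons_of_mem _ hx)
      · intro x hx hxe
        simp only [not_or, not_lt, not_and, not_lt] at hc
        rcases List.mem_cons.1 hx with rfl | hx
        · exact hmax x (by simp) hxe
        · rcases List.mem_cons.1 hx with rfl | hx
          · have hbc := hmin b (by simp)
            have hbm := hmax b (by simp)
            omega
          · exact hmax x (List.mem_cons_of_mem _ hx) hxe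

-- A's try/except on `.index` decides exactly membership of m
theorem pick_eq (ds : List Int) (m : Int) (p n : String) :
    (match PySem.List.index? ds m with
     | some _ => p
     | none =>
       match PySem.List.index? ds (-m) with
       | some _ => n
       | none => n) = if m ∈ ds then p else n := by
  cases hidx : PySem.List.index? ds m with
  | some k =>
    have hmem : m ∈ ds := by
      rw [← PySem.List.index?_isSome_iff, hidx]; rfl
    simp [hmem]
  | none =>
    have hmem : m ∉ ds := by rw [PySem.List.index?_eq_none_iff] at hidx; exact hidx
    simp only [hmem, if_false]
    cases PySem.List.index? ds (-m) <;> rfl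

-- the common core: A's staged computation over the diff list ds equals B's fold over ds
theorem branch_core (ds : List Int) (p n : String) :
    (let diff := if ds.length == 0 then ds ++ [(0 : Int)] else ds
     let m : Int := (PySem.List.min? (diff.map (fun x => |x|)) (fun y => y)).getD 0
     match PySem.List.index? diff m with
     | some _ => p
     | none =>
       match PySem.List.index? diff (-m) with
       | some _ => n
       | none => n) =
    (match List.foldl pvBetter none ds with
     | none => p
     | some b => if 0 ≤ b then p else n) := by
  cases ds with
  | nil => rfl
  | cons d t =>
    have hif : (if ((d :: t).length == 0) = true then (d :: t) ++ [(0 : Int)] else d :: t) = d :: t := by simp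
    simp only [hif, List.foldl]
    have hb : pvBetter none d = some d := rfl
    rw [hb]
    obtain ⟨c, hfold, hmem, hmin, hmax⟩ := foldl_better_some t d
    rw [hfold]
    rw [pick_eq]
    -- the min of the abs-map is |c|
    cases hm : PySem.List.min? ((d :: t).map (fun x => |x|)) (fun y => y) with
    | none =>
      exact absurd ((PySem.List.min?_eq_none_iff _ _).1 hm) (by simp)
    | some v =>
      have hvmem : v ∈ (d :: t).map (fun x => |x|) := PySem.List.min?_mem hm
      have hvmin : ∀ y ∈ (d :: t).map (fun x => |x|), v ≤ y := by
        intro y hy; exact PySem.List.min?_isMin hm y hy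
      obtain ⟨x, hx, rfl⟩ := List.mem_map.1 hvmem
      have h1 : |x| ≤ |c| := hvmin |c| (List.mem_map.2 ⟨c, hmem, rfl⟩)
      have h2 : |c| ≤ |x| := hmin x hx
      have hvc : |x| = |c| := le_antisymm h1 h2
      simp only [Option.getD, hvc]
      by_cases hpos : 0 ≤ c
      · have hcin : |c| ∈ d :: t := by
          have : |c| = c := abs_of_nonneg hpos
          rw [this]; exact hmem
        simp [hcin, hpos]
      · have hcnot : |c| ∉ d :: t := by
          intro hcontra
          have := hmax |c| hcontra (abs_abs c)
          have := abs_nonneg c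
          omega
        simp [hcnot, hpos]

-- ===== VERDICT =====
theorem turn_2_avoid_tail_spec : Claim_equal_turn_2_avoid_tail := by
  intro head_pos decision tail_pos _
  unfold Spec_turn_2_avoid_tail turn_2_avoid_tail turn_2_avoid_tail_alt
  by_cases h : PySem.Str.isIn "left" decision = true
  · simp only [h, if_true]
    rw [PySem.List.foldl_append_if, foldl_if_filter_map]
    simp only [List.nil_append]
    exact branch_core _ "right" "left"
  · simp only [h, Bool.false_eq_true, if_false]
    rw [PySem.List.foldl_append_if, foldl_if_filter_map]
    simp only [List.nil_append]
    exact branch_core _ "down" "up"
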